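-- pv_equiv track=rewrite | github.com/shiyi-oo/hypergraph-lower-ricci-curvature | code/src/be.py | ChoiceTable
-- ===== SOURCE A (Python) =====
-- def ChoiceTable(A,x):
--     xnbs=[]
--     for j in range(len(A)):
--         if A[x][j]==1:
--             xnbs.append(j)
--     D = len(xnbs)
--     RFmat= []
--     Res = [ [ [] for i in range(D) ] for j in range(D) ]
--     for a in range(D):
--         for b in range(D):
--             vert=[]
--             i = xnbs[a]
--             n = xnbs[b]
--             for j in range(len(A)):
--                 if A[i][j]==1 and A[n][j]==1:
--                     vert.append(j)
--             if  vert==[]: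
--                 RFmat.append(0)
--             else:
--                 RFmat.append(vert)
--             Res[a][b] = vert
--     return Res
-- ===== SOURCE B (Python) =====
-- def ChoiceTable(A, x):
--     n = len(A)
--     xnbs = [j for j in range(n) if A[x][j] == 1]
--     D = len(xnbs)
--     Res = [[[] for _ in range(D)] for _ in range(D)]
--     for j in range(n):
--         S = [a for a in range(D) if A[xnbs[a]][j] == 1]
--         for a in S:
--             for b in S:
--                 Res[a][b].append(j)
--     return Res
-- ===== Notes on version B (the rewrite author's own statement) =====
-- stated objective: alternative
-- what changed: Instead of scanning all n vertices separately for every ordered pair of x's neighbors, B makes one pass over the vertices: for each vertex j it collects the positions of x's neighbors adjacent to j and scatters j into exactly those pair cells.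
import Mathlib
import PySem

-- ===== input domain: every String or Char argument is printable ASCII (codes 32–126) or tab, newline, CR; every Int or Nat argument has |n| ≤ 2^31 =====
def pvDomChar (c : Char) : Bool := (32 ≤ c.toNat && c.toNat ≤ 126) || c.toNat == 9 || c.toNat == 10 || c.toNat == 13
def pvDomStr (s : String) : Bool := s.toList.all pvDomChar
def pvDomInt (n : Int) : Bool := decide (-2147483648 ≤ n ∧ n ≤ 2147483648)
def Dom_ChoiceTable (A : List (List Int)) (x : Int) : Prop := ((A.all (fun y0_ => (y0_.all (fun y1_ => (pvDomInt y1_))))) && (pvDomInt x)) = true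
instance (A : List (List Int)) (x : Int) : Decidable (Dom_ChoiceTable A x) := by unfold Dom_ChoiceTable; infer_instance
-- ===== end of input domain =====

-- B replaces A's scan of all n vertices per ordered pair of x's neighbors by one pass
-- over the vertices that scatters each vertex into the pair cells it belongs to
-- (an alternative decomposition; equivalence of RETURN values is what is proved).

-- ===== PORT A =====
-- literal transliteration of A: build xnbs by appending, then for each ordered pair
-- (a,b) of positions in xnbs rescan all vertices j building vert (RFmat is dead code
-- that never affects the return value and is omitted).
def ChoiceTable (A : List (List Int)) (x : Int) : List (List (List Int)) :=
  let n := A.length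
  let xrow := (PySem.List.pyGet? A x).getD []
  let xnbs := (List.range n).foldl (fun acc j => if xrow.getD j 0 == 1 then acc ++ [j] else acc) []
  let D := xnbs.length
  (List.range D).map (fun a =>
    (List.range D).map (fun b =>
      let i := xnbs.getD a 0
      let nn := xnbs.getD b 0
      (List.range n).foldl (fun vert j =>
        if (A.getD i []).getD j 0 == 1 && (A.getD nn []).getD j 0 == 1
        then vert ++ [Int.ofNat j] else vert) []))

-- ===== PORT B =====
-- transliteration of Source B: xnbs by comprehension (filter), a D×D grid of empty lists,
-- then one pass over vertices j: S = positions of x-neighbors adjacent to j, and j is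
-- appended to Res[a][b] exactly for a ∈ S, b ∈ S.
def ChoiceTable_alt (A : List (List Int)) (x : Int) : List (List (List Int)) :=
  let n := A.length
  let xrow := (PySem.List.pyGet? A x).getD []
  let xnbs := (List.range n).filter (fun j => xrow.getD j 0 == 1)
  let D := xnbs.length
  let init : List (List (List Int)) := (List.range D).map (fun _ => (List.range D).map (fun _ => []))
  (List.range n).foldl (fun Res j =>
    let S := (List.range D).filter (fun a => (A.getD (xnbs.getD a 0) []).getD j 0 == 1)
    Res.zipIdx.map (fun ra =>
      if ra.2 ∈ S then
        ra.1.zipIdx.map (fun cb => if cb.2 ∈ S then cb.1 ++ [Int.ofNat j] else cb.1)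
      else ra.1)) init

-- ===== PRECONDITION & SPEC =====
-- Pre_ excludes exactly the inputs on which Python A raises IndexError: a nonempty A with
-- x out of range, row A[x] shorter than len(A), or some neighbor row shorter than len(A).
def Pre_ChoiceTable (A : List (List Int)) (x : Int) : Prop :=
  A = [] ∨
    ((PySem.List.pyGet? A x).isSome = true ∧
     A.length ≤ ((PySem.List.pyGet? A x).getD []).length ∧
     ∀ j ∈ List.range A.length,
       ((PySem.List.pyGet? A x).getD []).getD j 0 = 1 → A.length ≤ (A.getD j []).length)
instance (A : List (List Int)) (x : Int) : Decidable (Pre_ChoiceTable A x) := by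
  unfold Pre_ChoiceTable; infer_instance

def pvWitness_ChoiceTable : List (List Int) × Int := ([[1, 1], [1, 0]], 0)

def Spec_ChoiceTable (A : List (List Int)) (x : Int) (out : List (List (List Int))) : Prop := out = ChoiceTable_alt A x
instance (A : List (List Int)) (x : Int) (out : List (List (List Int))) : Decidable (Spec_ChoiceTable A x out) := by unfold Spec_ChoiceTable; infer_instance

-- ===== CLAIM (what is proved, stated in full; the proofs are below) =====
def Claim_equal_ChoiceTable : Prop := ∀ (A : List (List Int)) (x : Int), Dom_ChoiceTable A x → Pre_ChoiceTable A x → Spec_ChoiceTable A x (ChoiceTable A x)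

-- ===== LEMMAS AND PROOFS =====

-- cell value both ports compute at position (a,b): the ascending list of vertices j
-- adjacent to both the a-th and the b-th element of xnbs, as Ints
def pvCell (A : List (List Int)) (xnbs : List Nat) (m a b : Nat) : List Int :=
  ((List.range m).filter (fun j =>
      (A.getD (xnbs.getD a 0) []).getD j 0 == 1 && (A.getD (xnbs.getD b 0) []).getD j 0 == 1)).map
    (fun j => Int.ofNat j)

theorem pv_range_zipIdx (D : Nat) : (List.range D).zipIdx = (List.range D).map (fun a => (a, a)) := by
  apply List.ext_getElem <;> simp

theorem pv_map_zipIdx_map {α β : Type} (f : Nat → α) (D : Nat) (g : α × Nat → β) :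
    ((List.range D).map f).zipIdx.map g = (List.range D).map (fun a => g (f a, a)) := by
  rw [List.zipIdx_map, pv_range_zipIdx]; simp [Function.comp]

theorem pvCell_succ (A : List (List Int)) (xnbs : List Nat) (m a b : Nat) :
    pvCell A xnbs (m + 1) a b =
      pvCell A xnbs m a b ++
        (if (A.getD (xnbs.getD a 0) []).getD m 0 == 1 && (A.getD (xnbs.getD b 0) []).getD m 0 == 1
         then [Int.ofNat m] else []) := by
  unfold pvCell
  rw [List.range_succ, List.filter_append, List.map_append]
  congr 1
  rw [List.filter_singleton]
  by_cases h : ((A.getD (xnbs.getD a 0) []).getD m 0 == 1 && (A.getD (xnbs.getD b 0) []).getD m 0 == 1) = true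
  · rw [h]; rfl
  · rw [Bool.not_eq_true] at h; rw [h]; rfl

-- B's fold maintains the full grid of pvCell values
theorem pvAlt_fold (A : List (List Int)) (xnbs : List Nat) (m : Nat) :
    (List.range m).foldl (fun Res j =>
      let S := (List.range xnbs.length).filter (fun a => (A.getD (xnbs.getD a 0) []).getD j 0 == 1)
      Res.zipIdx.map (fun ra =>
        if ra.2 ∈ S then
          ra.1.zipIdx.map (fun cb => if cb.2 ∈ S then cb.1 ++ [Int.ofNat j] else cb.1)
        else ra.1))
      ((List.range xnbs.length).map (fun _ => (List.range xnbs.length).map (fun _ => []))) =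
    (List.range xnbs.length).map (fun a => (List.range xnbs.length).map (fun b => pvCell A xnbs m a b)) := by
  induction m with
  | zero => simp [pvCell]
  | succ m ih =>
    rw [List.range_succ, List.foldl_append, ih]
    simp only [List.foldl_cons, List.foldl_nil]
    rw [pv_map_zipIdx_map]
    apply List.map_congr_left
    intro a ha
    by_cases hA : ((A.getD (xnbs.getD a 0) []).getD m 0 == 1) = true
    · have hma : a ∈ List.filter (fun a => (A.getD (xnbs.getD a 0) []).getD m 0 == 1)
          (List.range xnbs.length) := List.mem_filter.mpr ⟨ha, hA⟩
      rw [if_pos hma, pv_map_zipIdx_map]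
      apply List.map_congr_left
      intro b hb
      by_cases hB : ((A.getD (xnbs.getD b 0) []).getD m 0 == 1) = true
      · have hmb : b ∈ List.filter (fun a => (A.getD (xnbs.getD a 0) []).getD m 0 == 1)
            (List.range xnbs.length) := List.mem_filter.mpr ⟨hb, hB⟩
        have hc : ((A.getD (xnbs.getD a 0) []).getD m 0 == 1 &&
            (A.getD (xnbs.getD b 0) []).getD m 0 == 1) = true := by
          rw [Bool.and_eq_true]; exact ⟨hA, hB⟩
        rw [if_pos hmb, pvCell_succ, if_pos hc]
      · have hmb : b ∉ List.filter (fun a => (A.getD (xnbs.getD a 0) []).getD m 0 == 1)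
            (List.range xnbs.length) := fun h => hB (List.mem_filter.mp h).2
        have hc : ¬ ((A.getD (xnbs.getD a 0) []).getD m 0 == 1 &&
            (A.getD (xnbs.getD b 0) []).getD m 0 == 1) = true := by
          rw [Bool.and_eq_true]; exact fun h => hB h.2
        rw [if_neg hmb, pvCell_succ, if_neg hc, List.append_nil]
    · have hma : a ∉ List.filter (fun a => (A.getD (xnbs.getD a 0) []).getD m 0 == 1)
          (List.range xnbs.length) := fun h => hA (List.mem_filter.mp h).2
      rw [if_neg hma]
      apply List.map_congr_left
      intro b hb
      have hc : ¬ ((A.getD (xnbs.getD a 0) []).getD m 0 == 1 &&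
          (A.getD (xnbs.getD b 0) []).getD m 0 == 1) = true := by
        rw [Bool.and_eq_true]; exact fun h => hA h.1
      rw [pvCell_succ, if_neg hc, List.append_nil]

-- A's vert loop computes pvCell
theorem pvA_vert (A : List (List Int)) (xnbs : List Nat) (m a b : Nat) :
    (List.range m).foldl (fun vert j =>
        if (A.getD (xnbs.getD a 0) []).getD j 0 == 1 && (A.getD (xnbs.getD b 0) []).getD j 0 == 1
        then vert ++ [Int.ofNat j] else vert) [] = pvCell A xnbs m a b := by
  unfold pvCell
  rw [PySem.List.foldl_append_if, List.nil_append]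

-- A's xnbs loop computes the filter B uses
theorem pvXnbs (xrow : List Int) (n : Nat) :
    (List.range n).foldl (fun acc j => if xrow.getD j 0 == 1 then acc ++ [j] else acc) [] =
      (List.range n).filter (fun j => xrow.getD j 0 == 1) := by
  rw [PySem.List.foldl_append_if_eq_filter, List.nil_append]

-- ===== VERDICT (by name: the statement is the Claim_ definition above) =====
theorem ChoiceTable_spec : Claim_equal_ChoiceTable := by
  intro A x _ _
  unfold Spec_ChoiceTable ChoiceTable ChoiceTable_alt
  simp only [pvXnbs, pvAlt_fold]
  apply List.map_congr_left
  intro a _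
  apply List.map_congr_left
  intro b _
  exact pvA_vert _ _ _ _ _
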